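-- pv_equiv track=rewrite | github.com/Xych3-n/FlattenExcel | core/table_utils.py | extract_tables_from_rows
-- ===== SOURCE A (Python) =====
-- def extract_tables_from_rows(rows):
--     """
--     从连续的行数据中提取独立的表格块。
--     空白行作为表格的分隔符，将非空行聚集为一个表格。
--     返回：列表，包含多个表格（每个表格是行的列表）。
--     """
--     tables = []
--     current = []
--     for row in rows:
--         # 判断该行是否全为空或空字符串
--         if all(cell is None or str(cell).strip() == '' for cell in row):
--             # 遇到空行，且当前有积累的表格，存储并重置
--             if current:
--                 tables.append(current)
--                 current = []
--         else:
--             # 非空行，加入当前表格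
--             current.append(row)
--     # 最后一组非空行也加入
--     if current:
--         tables.append(current)
--     return tables
-- ===== SOURCE B (Python) =====
-- def extract_tables_from_rows(rows):
--     """Two-pointer run extraction: skip blank rows, slice out each maximal
--     run of non-blank rows in one step instead of accumulating row by row."""
--     def is_blank(row):
--         return all(cell is None or str(cell).strip() == '' for cell in row)
--     tables = []
--     i, n = 0, len(rows)
--     while i < n:
--         if is_blank(rows[i]):
--             i += 1
--         else:
--             j = i
--             while j < n and not is_blank(rows[j]):
--                 j += 1
--             tables.append(rows[i:j])
--             i = j
--     return tables
-- ===== Notes on version B (the rewrite author's own statement) =====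
-- stated objective: alternative
-- what changed: Replaces the accumulator-and-reset loop with a two-pointer scan that skips blank rows and slices out each maximal non-blank run whole.
import Mathlib
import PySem

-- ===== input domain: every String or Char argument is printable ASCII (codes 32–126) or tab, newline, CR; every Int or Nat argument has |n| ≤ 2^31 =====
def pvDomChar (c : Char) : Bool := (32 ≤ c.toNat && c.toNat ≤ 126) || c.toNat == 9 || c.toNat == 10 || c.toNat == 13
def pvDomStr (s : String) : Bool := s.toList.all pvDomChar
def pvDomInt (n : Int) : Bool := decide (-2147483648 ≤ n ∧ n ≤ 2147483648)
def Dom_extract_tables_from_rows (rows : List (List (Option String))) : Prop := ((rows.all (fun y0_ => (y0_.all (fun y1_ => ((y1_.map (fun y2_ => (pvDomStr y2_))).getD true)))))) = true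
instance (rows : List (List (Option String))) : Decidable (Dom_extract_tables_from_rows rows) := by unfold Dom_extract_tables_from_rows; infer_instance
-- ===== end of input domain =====

-- B replaces A's accumulator-and-reset loop with a two-pointer scan slicing out each
-- maximal non-blank run whole (objective: alternative decomposition, same cost).

-- shared blank-row test: all(cell is None or str(cell).strip() == '' for cell in row)
def pvIsBlankRow (row : List (Option String)) : Bool :=
  row.all (fun cell => match cell with
    | none => true
    | some s => PySem.Str.strip s == "")

-- ===== PORT A =====
-- the loop body and the final 'if current' of A, as named helpers
def pvStepA (s : List (List (List (Option String))) × List (List (Option String)))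
    (row : List (Option String)) : List (List (List (Option String))) × List (List (Option String)) :=
  if pvIsBlankRow row then
    if s.2 ≠ [] then (s.1 ++ [s.2], []) else s
  else
    (s.1, s.2 ++ [row])

def pvFinishA (s : List (List (List (Option String))) × List (List (Option String))) :
    List (List (List (Option String))) :=
  if s.2 ≠ [] then s.1 ++ [s.2] else s.1

def extract_tables_from_rows (rows : List (List (Option String))) : List (List (List (Option String))) :=
  pvFinishA (rows.foldl pvStepA ([], []))

-- ===== PORT B =====
-- the outer while loop of Source B: skip a blank row, otherwise take the maximal
-- non-blank run (inner while = takeWhile) and continue past it (dropWhile)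
def extract_tables_from_rows_alt (rows : List (List (Option String))) : List (List (List (Option String))) :=
  match rows with
  | [] => []
  | r :: rest =>
    if pvIsBlankRow r then extract_tables_from_rows_alt rest
    else ((r :: rest).takeWhile (fun x => ¬ pvIsBlankRow x)) ::
         extract_tables_from_rows_alt ((r :: rest).dropWhile (fun x => ¬ pvIsBlankRow x))
termination_by rows.length
decreasing_by
  · simp
  · simp only [List.dropWhile]
    simp_all
    exact List.length_dropWhile_le _ _

-- ===== PRECONDITION & SPEC =====
def Spec_extract_tables_from_rows (rows : List (List (Option String))) (out : List (List (List (Option String)))) : Prop := out = extract_tables_from_rows_alt rows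
instance (rows : List (List (Option String))) (out : List (List (List (Option String)))) : Decidable (Spec_extract_tables_from_rows rows out) := by unfold Spec_extract_tables_from_rows; infer_instance

-- ===== CLAIM (what is proved, stated in full; the proofs are below) =====
def Claim_equal_extract_tables_from_rows : Prop := ∀ (rows : List (List (Option String))), Dom_extract_tables_from_rows rows → Spec_extract_tables_from_rows rows (extract_tables_from_rows rows)

-- ===== LEMMAS AND PROOFS =====

-- the residue of A's fold given a pending 'current' accumulator
def pvResA (current : List (List (Option String))) : List (List (Option String)) → List (List (List (Option String)))
  | [] => if current ≠ [] then [current] else []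
  | r :: rs =>
    if pvIsBlankRow r then
      (if current ≠ [] then current :: pvResA [] rs else pvResA [] rs)
    else pvResA (current ++ [r]) rs

lemma pvResA_foldl (rows : List (List (Option String)))
    (t : List (List (List (Option String)))) (c : List (List (Option String))) :
    pvFinishA (rows.foldl pvStepA (t, c)) = t ++ pvResA c rows := by
  induction rows generalizing t c with
  | nil =>
    by_cases h : c = [] <;> simp [pvResA, pvFinishA, h]
  | cons r rs ih =>
    rw [List.foldl_cons, pvResA, pvStepA]
    by_cases hb : pvIsBlankRow r
    · by_cases hc : c = []
      · simpa [hb, hc] using ih t c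
      · simp only [hb, hc, ne_eq, not_false_iff, if_pos]
        rw [ih (t ++ [c]) []]
        simp
    · simpa [hb] using ih t (c ++ [r])

lemma pvResA_alt (rows : List (List (Option String))) :
    pvResA [] rows = extract_tables_from_rows_alt rows ∧
    ∀ c : List (List (Option String)), c ≠ [] →
      pvResA c rows = (c ++ rows.takeWhile (fun x => ¬ pvIsBlankRow x)) ::
        extract_tables_from_rows_alt (rows.dropWhile (fun x => ¬ pvIsBlankRow x)) := by
  induction rows with
  | nil =>
    constructor
    · simp [pvResA, extract_tables_from_rows_alt]
    · intro c hc; simp [pvResA, hc, extract_tables_from_rows_alt]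
  | cons r rs ih =>
    obtain ⟨ih0, ihc⟩ := ih
    by_cases hb : pvIsBlankRow r
    · constructor
      · simp [pvResA, hb, extract_tables_from_rows_alt, ih0]
      · intro c hc
        simp [pvResA, hb, hc, List.takeWhile, List.dropWhile, extract_tables_from_rows_alt, ih0]
    · constructor
      · rw [pvResA]
        simp only [hb, Bool.false_eq_true, if_false, List.nil_append]
        rw [ihc [r] (by simp)]
        rw [extract_tables_from_rows_alt]
        simp [hb, List.takeWhile, List.dropWhile]
      · intro c hc
        rw [pvResA]
        simp only [hb, Bool.false_eq_true, if_false]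
        rw [ihc (c ++ [r]) (by simp), List.takeWhile, List.dropWhile]
        simp [hb]

-- ===== VERDICT (by name: the statement is the Claim_ definition above) =====
theorem extract_tables_from_rows_spec : Claim_equal_extract_tables_from_rows := by
  intro rows _
  unfold Spec_extract_tables_from_rows extract_tables_from_rows
  rw [pvResA_foldl rows [] []]
  simp [(pvResA_alt rows).1]
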